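-- pv_equiv track=rewrite | github.com/ripclass/rulgpt | rulegpt-api/app/services/rag/pipeline.py | _query_needs_lcopilot_redirect
-- ===== SOURCE A (Python) =====
-- def _query_needs_lcopilot_redirect(query: str) -> bool:
--     """Detect queries asking to validate/review actual documents.
--
--     Must be narrow — "Is this compliant with the G7 price cap?" is a sanctions
--     question, NOT a document validation request.  Only trigger when the query
--     clearly asks to examine a specific LC, invoice, or document set.
--     """
--     lowered = query.lower()
--
--     # Exact document-validation phrases
--     _DOC_VALIDATION_PHRASES = (
--         "is this lc compliant",
--         "is this l/c compliant",
--         "is my lc compliant",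
--         "are my documents compliant",
--         "are these documents compliant",
--         "review my lc",
--         "validate my lc",
--         "check my lc",
--         "document validation",
--         "validate this document",
--         "validate my documents",
--         "review my invoice",
--         "review my document",
--         "review my documents",
--         "review invoice wording",
--         "check my invoice",
--         "check my documents",
--         "check my document",
--         "validate my invoice",
--     )
--
--     return any(phrase in lowered for phrase in _DOC_VALIDATION_PHRASES)
-- ===== SOURCE B (Python) =====
-- _DOC_VALIDATION_PHRASES = (
--     "is this lc compliant",
--     "is this l/c compliant",
--     "is my lc compliant",
--     "are my documents compliant",
--     "are these documents compliant",
--     "review my lc",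
--     "validate my lc",
--     "check my lc",
--     "document validation",
--     "validate this document",
--     "validate my documents",
--     "review my invoice",
--     "review my document",
--     "review my documents",
--     "review invoice wording",
--     "check my invoice",
--     "check my documents",
--     "check my document",
--     "validate my invoice",
-- )
--
-- # First-character dispatch table, built once: phrases grouped by their first letter.
-- _BY_FIRST = {}
-- for _p in _DOC_VALIDATION_PHRASES:
--     _BY_FIRST.setdefault(_p[0], []).append(_p)
--
--
-- def _query_needs_lcopilot_redirect(query: str) -> bool:
--     """Single left-to-right scan of the lowered query: at each position only the
--     phrases starting with that character are tested (one startswith each),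
--     instead of one full independent substring scan per phrase as in A."""
--     lowered = query.lower()
--     for i, ch in enumerate(lowered):
--         for phrase in _BY_FIRST.get(ch, ()):
--             if lowered.startswith(phrase, i):
--                 return True
--     return False
-- ===== Notes on version B (the rewrite author's own statement) =====
-- stated objective: alternative
-- what changed: B replaces A's 19 independent per-phrase substring scans with one left-to-right positional scan of the lowered query that, at each position, tests via startswith only the phrases grouped under that position's first character in a dispatch dict built once at module load.
import Mathlib
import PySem

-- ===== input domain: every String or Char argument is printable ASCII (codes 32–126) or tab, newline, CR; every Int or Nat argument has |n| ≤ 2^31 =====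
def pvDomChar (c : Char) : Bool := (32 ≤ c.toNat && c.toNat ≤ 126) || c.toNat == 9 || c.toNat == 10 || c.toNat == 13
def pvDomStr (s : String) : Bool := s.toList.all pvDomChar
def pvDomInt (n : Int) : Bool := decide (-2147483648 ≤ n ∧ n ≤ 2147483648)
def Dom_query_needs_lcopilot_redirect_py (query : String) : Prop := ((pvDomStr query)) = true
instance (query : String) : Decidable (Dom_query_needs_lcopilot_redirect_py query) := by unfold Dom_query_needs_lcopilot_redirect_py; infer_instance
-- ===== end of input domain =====

-- B replaces A's per-phrase substring scans with one left-to-right positional scan of the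
-- lowered query, dispatching at each position on its first character through a table built
-- once (objective: alternative; same return value, no side effects).

-- ===== PORT A =====
-- the module-level phrase tuple, as A holds it: a tuple of strings
def pvPhrases : List String :=
  ["is this lc compliant", "is this l/c compliant", "is my lc compliant",
   "are my documents compliant", "are these documents compliant", "review my lc",
   "validate my lc", "check my lc", "document validation", "validate this document",
   "validate my documents", "review my invoice", "review my document",
   "review my documents", "review invoice wording", "check my invoice",
   "check my documents", "check my document", "validate my invoice"]

def query_needs_lcopilot_redirect_py (query : String) : Bool :=
  let lowered := PySem.Str.lower query
  pvPhrases.any (fun phrase => PySem.Str.isIn phrase lowered)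

-- ===== PORT B =====
-- B's phrase data, char-wise (B works position-wise on the lowered character sequence)
def pvPhrasesB : List (List Char) :=
  [['i', 's', ' ', 't', 'h', 'i', 's', ' ', 'l', 'c', ' ', 'c', 'o', 'm', 'p', 'l', 'i', 'a', 'n', 't'],
   ['i', 's', ' ', 't', 'h', 'i', 's', ' ', 'l', '/', 'c', ' ', 'c', 'o', 'm', 'p', 'l', 'i', 'a', 'n', 't'],
   ['i', 's', ' ', 'm', 'y', ' ', 'l', 'c', ' ', 'c', 'o', 'm', 'p', 'l', 'i', 'a', 'n', 't'],
   ['a', 'r', 'e', ' ', 'm', 'y', ' ', 'd', 'o', 'c', 'u', 'm', 'e', 'n', 't', 's', ' ', 'c', 'o', 'm', 'p', 'l', 'i', 'a', 'n', 't'],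
   ['a', 'r', 'e', ' ', 't', 'h', 'e', 's', 'e', ' ', 'd', 'o', 'c', 'u', 'm', 'e', 'n', 't', 's', ' ', 'c', 'o', 'm', 'p', 'l', 'i', 'a', 'n', 't'],
   ['r', 'e', 'v', 'i', 'e', 'w', ' ', 'm', 'y', ' ', 'l', 'c'],
   ['v', 'a', 'l', 'i', 'd', 'a', 't', 'e', ' ', 'm', 'y', ' ', 'l', 'c'],
   ['c', 'h', 'e', 'c', 'k', ' ', 'm', 'y', ' ', 'l', 'c'],
   ['d', 'o', 'c', 'u', 'm', 'e', 'n', 't', ' ', 'v', 'a', 'l', 'i', 'd', 'a', 't', 'i', 'o', 'n'],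
   ['v', 'a', 'l', 'i', 'd', 'a', 't', 'e', ' ', 't', 'h', 'i', 's', ' ', 'd', 'o', 'c', 'u', 'm', 'e', 'n', 't'],
   ['v', 'a', 'l', 'i', 'd', 'a', 't', 'e', ' ', 'm', 'y', ' ', 'd', 'o', 'c', 'u', 'm', 'e', 'n', 't', 's'],
   ['r', 'e', 'v', 'i', 'e', 'w', ' ', 'm', 'y', ' ', 'i', 'n', 'v', 'o', 'i', 'c', 'e'],
   ['r', 'e', 'v', 'i', 'e', 'w', ' ', 'm', 'y', ' ', 'd', 'o', 'c', 'u', 'm', 'e', 'n', 't'],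
   ['r', 'e', 'v', 'i', 'e', 'w', ' ', 'm', 'y', ' ', 'd', 'o', 'c', 'u', 'm', 'e', 'n', 't', 's'],
   ['r', 'e', 'v', 'i', 'e', 'w', ' ', 'i', 'n', 'v', 'o', 'i', 'c', 'e', ' ', 'w', 'o', 'r', 'd', 'i', 'n', 'g'],
   ['c', 'h', 'e', 'c', 'k', ' ', 'm', 'y', ' ', 'i', 'n', 'v', 'o', 'i', 'c', 'e'],
   ['c', 'h', 'e', 'c', 'k', ' ', 'm', 'y', ' ', 'd', 'o', 'c', 'u', 'm', 'e', 'n', 't', 's'],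
   ['c', 'h', 'e', 'c', 'k', ' ', 'm', 'y', ' ', 'd', 'o', 'c', 'u', 'm', 'e', 'n', 't'],
   ['v', 'a', 'l', 'i', 'd', 'a', 't', 'e', ' ', 'm', 'y', ' ', 'i', 'n', 'v', 'o', 'i', 'c', 'e']]

-- _BY_FIRST: 'setdefault(p[0], []).append(p)' is Dict.modify (p[0]) [] (· ++ [p]);
-- p[0] ported as p.headD ' ' (every phrase is nonempty, so the default is never read)
def pvByFirst : PySem.Dict Char (List (List Char)) :=
  pvPhrasesB.foldl (fun d p => d.modify (p.headD ' ') [] (· ++ [p])) PySem.Dict.empty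

-- 'lowered.startswith(phrase, i)' with 0 ≤ i < len(lowered) is startswith on drop i
def query_needs_lcopilot_redirect_py_alt (query : String) : Bool :=
  let lowered := PySem.Chars.lower query.toList
  (PySem.List.enumerate lowered 0).any (fun ic =>
    (pvByFirst.getD ic.2 []).any (fun phrase =>
      PySem.Chars.startswith (lowered.drop ic.1.toNat) phrase))

-- ===== PRECONDITION & SPEC =====
def Spec_query_needs_lcopilot_redirect_py (query : String) (out : Bool) : Prop := out = query_needs_lcopilot_redirect_py_alt query
instance (query : String) (out : Bool) : Decidable (Spec_query_needs_lcopilot_redirect_py query out) := by unfold Spec_query_needs_lcopilot_redirect_py; infer_instance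

-- ===== CLAIM (what is proved, stated in full; the proofs are below) =====
def Claim_equal_query_needs_lcopilot_redirect_py : Prop := ∀ (query : String), Dom_query_needs_lcopilot_redirect_py query → Spec_query_needs_lcopilot_redirect_py query (query_needs_lcopilot_redirect_py query)

-- ===== LEMMAS AND PROOFS =====

lemma pvPhrasesB_eq : pvPhrasesB = pvPhrases.map String.toList := by decide

lemma pvByFirst_getD (ch : Char) :
    pvByFirst.getD ch [] = pvPhrasesB.filter (fun p => p.headD ' ' == ch) := by
  unfold pvByFirst
  have h := PySem.Dict.getD_foldl_modify_append (l := pvPhrasesB.map (fun p => (p.headD ' ', p))) (d := (PySem.Dict.empty : PySem.Dict Char (List (List Char)))) (c := ch)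
  rw [List.foldl_map] at h
  rw [h]
  simp only [PySem.Dict.getD_empty, List.nil_append]
  clear h
  induction pvPhrasesB with
  | nil => simp
  | cons p l ih =>
    simp only [List.map_cons, List.filter_cons]
    split_ifs
    · simp only [List.map_cons]; rw [ih]
    · exact ih

lemma pvPhrasesB_ne_nil : ∀ p ∈ pvPhrasesB, p ≠ [] := by decide

lemma pv_mem_enumerate {α : Type} (xs : List α) (s : Int) (j : Nat) (h : j < xs.length) :
    ((s + (j : Int)), xs[j]) ∈ PySem.List.enumerate xs s := by
  induction xs generalizing s j with
  | nil => simp at h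
  | cons x xs ih =>
    rw [PySem.List.enumerate_cons]
    cases j with
    | zero => simp
    | succ k =>
      right
      have := ih (s + 1) k (by simpa using h)
      simpa [add_comm, add_left_comm, add_assoc] using this

-- ===== VERDICT (by name: the statement is the Claim_ definition above) =====
theorem query_needs_lcopilot_redirect_py_spec : Claim_equal_query_needs_lcopilot_redirect_py := by
  intro query _
  unfold Spec_query_needs_lcopilot_redirect_py
  unfold query_needs_lcopilot_redirect_py query_needs_lcopilot_redirect_py_alt
  simp only [PySem.Str.isIn_eq, PySem.Str.toList_lower]
  rw [Bool.eq_iff_iff]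
  simp only [List.any_eq_true]
  set L := PySem.Chars.lower query.toList with hL
  constructor
  · rintro ⟨ph, hph, hin⟩
    obtain ⟨j, hpre⟩ := (PySem.Chars.exists_prefix_drop_iff_isIn _ _).mpr hin
    have hpl : ph.toList ∈ pvPhrasesB := by
      rw [pvPhrasesB_eq]; exact List.mem_map_of_mem hph
    have hne : ph.toList ≠ [] := pvPhrasesB_ne_nil _ hpl
    have hj : j < L.length := by
      by_contra hc
      push Not at hc
      rw [List.drop_eq_nil_of_le hc] at hpre
      exact hne (List.prefix_nil.mp hpre)
    obtain ⟨r, hr⟩ := hpre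
    have hhd : (L.drop j).head? = ph.toList.head? := by
      rw [← hr]
      cases h : ph.toList with
      | nil => exact absurd h hne
      | cons c t => simp
    have hLj : L[j]? = ph.toList.head? := by
      rw [← List.head?_drop, hhd]
    refine ⟨((j : Int), L[j]), ?_, ph.toList, ?_, ?_⟩
    · simpa using pv_mem_enumerate L 0 j hj
    · rw [pvByFirst_getD]
      refine List.mem_filter.mpr ⟨hpl, ?_⟩
      have : ph.toList.head? = some L[j] := by
        rw [← hLj, List.getElem?_eq_getElem hj]
      cases h : ph.toList with
      | nil => exact absurd h hne
      | cons c t => rw [h] at this; simp at this; simp [this]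
    · rw [Int.toNat_natCast]
      exact (PySem.Chars.startswith_iff _ _).mpr ⟨r, hr⟩
  · rintro ⟨ic, _, p, hp, hsw⟩
    rw [pvByFirst_getD] at hp
    have hpl := (List.mem_filter.mp hp).1
    rw [pvPhrasesB_eq] at hpl
    obtain ⟨ph, hph, rfl⟩ := List.mem_map.mp hpl
    refine ⟨ph, hph, ?_⟩
    exact (PySem.Chars.exists_prefix_drop_iff_isIn _ _).mp
      ⟨ic.1.toNat, (PySem.Chars.startswith_iff _ _).mp hsw⟩
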